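-- pv_equiv track=rewrite | github.com/levineuwirth/icd_embeddings | backend/test_icd_search.py | search_icd
-- ===== SOURCE A (Python) =====
-- def search_icd(icd_codes_dict, query, limit=50):
--     """
--     Simulates the search_icd endpoint logic.
--
--     Args:
--         icd_codes_dict: Dictionary of ICD codes and descriptions
--         query: Search query string
--         limit: Maximum number of results
--
--     Returns:
--         Dictionary of matching ICD codes and descriptions
--     """
--     if not query or len(query.strip()) == 0:
--         return {}
--
--     q = query.strip().lower()
--     results = {}
--
--     # Categorize results by match type for better ordering
--     exact_code_matches = {}
--     code_starts_with = {}
--     code_contains = {}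
--     desc_contains = {}
--
--     for code, description in icd_codes_dict.items():
--         code_lower = code.lower()
--         desc_lower = description.lower()
--
--         # Exact code match (highest priority)
--         if code_lower == q:
--             exact_code_matches[code] = description
--         # Code starts with query (high priority)
--         elif code_lower.startswith(q):
--             code_starts_with[code] = description
--         # Code contains query (medium priority)
--         elif q in code_lower:
--             code_contains[code] = description
--         # Description contains query (lower priority)
--         elif q in desc_lower:
--             desc_contains[code] = description
--
--     # Combine results in priority order
--     results.update(exact_code_matches)
--     results.update(code_starts_with)
--     results.update(code_contains)
--     results.update(desc_contains)
--
--     # Limit results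
--     if len(results) > limit:
--         results = dict(list(results.items())[:limit])
--
--     return results
-- ===== SOURCE B (Python) =====
-- def search_icd(icd_codes_dict, query, limit=50):
--     """One pass scoring each entry with a match priority, then a stable sort on
--     the priority alone (ties keep dict insertion order), truncate, rebuild."""
--     q = query.strip().lower()
--     if not q:
--         return {}
--
--     def prio(code, desc):
--         cl = code.lower()
--         if cl == q:
--             return 0
--         if cl.startswith(q):
--             return 1
--         if q in cl:
--             return 2
--         if q in desc.lower():
--             return 3
--         return None
--
--     scored = []
--     for code, desc in icd_codes_dict.items():
--         p = prio(code, desc)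
--         if p is not None:
--             scored.append((p, code, desc))
--
--     scored.sort(key=lambda t: t[0])  # stable
--     if len(scored) > limit:
--         scored = scored[:limit]
--     return {code: desc for _, code, desc in scored}
-- ===== Notes on version B (the rewrite author's own statement) =====
-- stated objective: alternative
-- what changed: Replaces the four per-category dicts that A merges in priority order by one scored (priority, code, description) tuple list that is stable-sorted on the priority key alone (ties keep dict insertion order), truncated, and rebuilt into a dict.
import Mathlib
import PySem

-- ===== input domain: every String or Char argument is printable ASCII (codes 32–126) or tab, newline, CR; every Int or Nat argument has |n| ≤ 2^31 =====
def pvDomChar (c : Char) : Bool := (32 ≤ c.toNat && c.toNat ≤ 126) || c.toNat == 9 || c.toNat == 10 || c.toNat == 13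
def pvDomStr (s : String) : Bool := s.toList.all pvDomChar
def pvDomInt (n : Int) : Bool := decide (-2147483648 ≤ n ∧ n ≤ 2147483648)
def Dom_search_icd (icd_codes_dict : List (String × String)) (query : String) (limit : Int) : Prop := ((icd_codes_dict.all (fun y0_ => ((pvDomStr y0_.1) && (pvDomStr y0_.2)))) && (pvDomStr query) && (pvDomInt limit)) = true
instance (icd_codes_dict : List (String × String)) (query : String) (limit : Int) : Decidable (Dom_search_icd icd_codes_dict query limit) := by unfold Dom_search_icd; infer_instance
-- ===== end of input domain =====

-- B replaces A's four per-category dicts merged in priority order by one scored tuple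
-- list stable-sorted on the priority alone, truncated and rebuilt (objective: alternative).


-- ===== PORT A =====
-- the loop body: categorize one (code, description) pair into the four dicts
def pvStepA (q : List Char)
    (st : PySem.Dict String String × PySem.Dict String String × PySem.Dict String String × PySem.Dict String String)
    (cd : String × String) :
    PySem.Dict String String × PySem.Dict String String × PySem.Dict String String × PySem.Dict String String :=
  let cl := PySem.Chars.lower cd.1.toList
  let dl := PySem.Chars.lower cd.2.toList
  if cl == q then (st.1.insert cd.1 cd.2, st.2.1, st.2.2.1, st.2.2.2)
  else if PySem.Chars.startswith cl q then (st.1, st.2.1.insert cd.1 cd.2, st.2.2.1, st.2.2.2)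
  else if PySem.Chars.isIn q cl then (st.1, st.2.1, st.2.2.1.insert cd.1 cd.2, st.2.2.2)
  else if PySem.Chars.isIn q dl then (st.1, st.2.1, st.2.2.1, st.2.2.2.insert cd.1 cd.2)
  else st

def search_icd (icd_codes_dict : List (String × String)) (query : String) (limit : Int) : List (String × String) :=
  if query.toList == ([] : List Char) || PySem.Chars.len (PySem.Chars.strip query.toList) == 0 then [] else
  let q := PySem.Chars.lower (PySem.Chars.strip query.toList)
  let st := ((PySem.Dict.ofList icd_codes_dict).items).foldl (pvStepA q)
      ((PySem.Dict.empty : PySem.Dict String String), PySem.Dict.empty, PySem.Dict.empty, PySem.Dict.empty)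
  let results := (((((PySem.Dict.empty : PySem.Dict String String).update st.1.items).update
      st.2.1.items).update st.2.2.1.items).update st.2.2.2.items)
  let results := if (results.size : Int) > limit
    then PySem.Dict.ofList (PySem.List.slice results.items none (some limit)) else results
  results.items

-- ===== PORT B =====
-- match priority of one entry: 0 exact code, 1 code prefix, 2 code contains, 3 description contains
def pvPrio (q : List Char) (code desc : String) : Option Int :=
  let cl := PySem.Chars.lower code.toList
  if cl == q then some 0
  else if PySem.Chars.startswith cl q then some 1
  else if PySem.Chars.isIn q cl then some 2
  else if PySem.Chars.isIn q (PySem.Chars.lower desc.toList) then some 3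
  else none

def search_icd_alt (icd_codes_dict : List (String × String)) (query : String) (limit : Int) : List (String × String) :=
  let q := PySem.Chars.lower (PySem.Chars.strip query.toList)
  if q == ([] : List Char) then [] else
  let scored := ((PySem.Dict.ofList icd_codes_dict).items).foldl
      (fun acc cd => match pvPrio q cd.1 cd.2 with
        | some p => acc ++ [(p, cd.1, cd.2)]
        | none => acc) []
  let sc := PySem.List.sorted scored (fun t => t.1)
  let sc := if (sc.length : Int) > limit then PySem.List.slice sc none (some limit) else sc
  (PySem.Dict.ofList (sc.map (fun t => (t.2.1, t.2.2)))).items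

-- ===== PRECONDITION & SPEC =====
def Spec_search_icd (icd_codes_dict : List (String × String)) (query : String) (limit : Int) (out : List (String × String)) : Prop := out = search_icd_alt icd_codes_dict query limit
instance (icd_codes_dict : List (String × String)) (query : String) (limit : Int) (out : List (String × String)) : Decidable (Spec_search_icd icd_codes_dict query limit out) := by unfold Spec_search_icd; infer_instance

-- ===== CLAIM (what is proved, stated in full; the proofs are below) =====
def Claim_equal_search_icd : Prop := ∀ (icd_codes_dict : List (String × String)) (query : String) (limit : Int), Dom_search_icd icd_codes_dict query limit → Spec_search_icd icd_codes_dict query limit (search_icd icd_codes_dict query limit)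

-- ===== LEMMAS AND PROOFS =====

-- entries of L whose match priority is k
def pvF (q : List Char) (k : Int) (L : List (String × String)) : List (String × String) :=
  L.filter (fun cd => pvPrio q cd.1 cd.2 == some k)

def pvScored (q : List Char) (L : List (String × String)) : List (Int × String × String) :=
  L.filterMap (fun cd => (pvPrio q cd.1 cd.2).map (fun p => (p, cd.1, cd.2)))

lemma pv_guard_eq (query : String) :
    (query.toList == ([] : List Char) || PySem.Chars.len (PySem.Chars.strip query.toList) == 0)
      = (PySem.Chars.lower (PySem.Chars.strip query.toList) == ([] : List Char)) := by
  cases h : PySem.Chars.strip query.toList with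
  | nil => simp [h, PySem.Chars.len_eq, PySem.Chars.lower]
  | cons a t =>
      have hq : query.toList ≠ [] := by
        intro h0
        rw [h0] at h
        simp [show PySem.Chars.strip ([] : List Char) = [] from rfl] at h
      simp [h, PySem.Chars.len_eq, PySem.Chars.lower, hq]
      omega

lemma pv_foldB_eq (q : List Char) (L : List (String × String))
    (acc : List (Int × String × String)) :
    L.foldl (fun acc cd => match pvPrio q cd.1 cd.2 with
        | some p => acc ++ [(p, cd.1, cd.2)]
        | none => acc) acc = acc ++ pvScored q L := by
  induction L generalizing acc with
  | nil => simp [pvScored]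
  | cons cd L ih =>
      cases h : pvPrio q cd.1 cd.2 with
      | none => simp [pvScored, List.filterMap_cons, h, List.foldl_cons, ih]
      | some p => simp [pvScored, List.filterMap_cons, h, List.foldl_cons, ih]

lemma pv_pvPrio_mem {q : List Char} {c d : String} {p : Int} (h : pvPrio q c d = some p) :
    p = 0 ∨ p = 1 ∨ p = 2 ∨ p = 3 := by
  simp only [pvPrio] at h
  split_ifs at h
  all_goals first
    | (injection h with h; omega)
    | exact Option.noConfusion h

lemma pv_scored_mem (q : List Char) (L : List (String × String)) :
    ∀ t ∈ pvScored q L, t.1 = 0 ∨ t.1 = 1 ∨ t.1 = 2 ∨ t.1 = 3 := by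
  intro t ht
  simp only [pvScored, List.mem_filterMap] at ht
  obtain ⟨cd, _, hcd⟩ := ht
  cases hp : pvPrio q cd.1 cd.2 with
  | none => rw [hp] at hcd; simp at hcd
  | some p =>
      rw [hp] at hcd
      simp only [Option.map_some, Option.some.injEq] at hcd
      subst hcd
      simpa using pv_pvPrio_mem hp

lemma pv_filter_scored (q : List Char) (k : Int) (L : List (String × String)) :
    (pvScored q L).filter (fun t => t.1 == k) = (pvF q k L).map (fun cd => (k, cd.1, cd.2)) := by
  induction L with
  | nil => simp [pvScored, pvF]
  | cons cd L ih =>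
      simp only [pvScored, pvF, List.filterMap_cons, List.filter_cons] at ih ⊢
      cases h : pvPrio q cd.1 cd.2 with
      | none => simp [h, ih]
      | some p =>
          by_cases hp : p = k
          · subst hp; simp [h, ih]
          · simp [h, hp, ih]

lemma pv_insertBy_cons {α : Type} (bef : α → α → Bool) (x y : α) (ys : List α) :
    PySem.List.insertBy bef x (y :: ys) =
      if bef x y then x :: y :: ys else y :: PySem.List.insertBy bef x ys := rfl

lemma pv_insertBy_skip {α : Type} (bef : α → α → Bool) (x : α) (P S : List α)
    (h : ∀ y ∈ P, bef x y = false) :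
    PySem.List.insertBy bef x (P ++ S) = P ++ PySem.List.insertBy bef x S := by
  induction P with
  | nil => simp
  | cons y P ih =>
      have hy := h y (by simp)
      simp [pv_insertBy_cons, hy, ih (fun z hz => h z (List.mem_cons_of_mem _ hz))]

lemma pv_insertBy_front {α : Type} (bef : α → α → Bool) (x : α) (S : List α)
    (h : ∀ y ∈ S, bef x y = true) :
    PySem.List.insertBy bef x S = x :: S := by
  cases S with
  | nil => rfl
  | cons y ys => simp [pv_insertBy_cons, h y (by simp)]

lemma pv_sort4 : ∀ (xs A B C D : List (Int × String × String)),
    (∀ t ∈ xs, t.1 = 0 ∨ t.1 = 1 ∨ t.1 = 2 ∨ t.1 = 3) →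
    (∀ t ∈ A, t.1 = 0) → (∀ t ∈ B, t.1 = 1) → (∀ t ∈ C, t.1 = 2) → (∀ t ∈ D, t.1 = 3) →
    xs.foldl (fun acc x => PySem.List.insertBy (fun a b => decide (a.1 < b.1)) x acc) (A ++ B ++ C ++ D)
      = (A ++ xs.filter (fun t => t.1 == 0)) ++ (B ++ xs.filter (fun t => t.1 == 1))
        ++ (C ++ xs.filter (fun t => t.1 == 2)) ++ (D ++ xs.filter (fun t => t.1 == 3)) := by
  intro xs
  induction xs with
  | nil => intro A B C D _ _ _ _ _; simp
  | cons x xs ih =>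
      intro A B C D hx hA hB hC hD
      simp only [List.foldl_cons]
      rcases hx x (by simp) with h0 | h1 | h2 | h3
      · have hins : PySem.List.insertBy (fun a b => decide (a.1 < b.1)) x (A ++ B ++ C ++ D)
            = A ++ [x] ++ B ++ C ++ D := by
          rw [List.append_assoc, List.append_assoc,
              pv_insertBy_skip _ _ A _ (fun y hy => by simp [hA y hy, h0]),
              pv_insertBy_front _ _ _ (fun y hy => by
                rcases List.mem_append.1 hy with hy | hy
                · simp [h0, hB y hy]
                · rcases List.mem_append.1 hy with hy | hy
                  · simp [h0, hC y hy]
                  · simp [h0, hD y hy])]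
          simp [List.append_assoc]
        rw [hins, ih (A ++ [x]) B C D (fun t ht => hx t (by simp [ht]))
            (fun t ht => by
              rcases List.mem_append.1 ht with ht | ht
              · exact hA t ht
              · simp at ht; subst ht; exact h0) hB hC hD]
        simp [List.filter_cons, h0, List.append_assoc]
      · have hins : PySem.List.insertBy (fun a b => decide (a.1 < b.1)) x (A ++ B ++ C ++ D)
            = A ++ (B ++ [x]) ++ C ++ D := by
          rw [List.append_assoc, List.append_assoc,
              pv_insertBy_skip _ _ A _ (fun y hy => by simp [hA y hy, h1]),
              pv_insertBy_skip _ _ B _ (fun y hy => by simp [hB y hy, h1]),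
              pv_insertBy_front _ _ _ (fun y hy => by
                rcases List.mem_append.1 hy with hy | hy
                · simp [h1, hC y hy]
                · simp [h1, hD y hy])]
          simp [List.append_assoc]
        rw [hins, ih A (B ++ [x]) C D (fun t ht => hx t (by simp [ht])) hA
            (fun t ht => by
              rcases List.mem_append.1 ht with ht | ht
              · exact hB t ht
              · simp at ht; subst ht; exact h1) hC hD]
        simp [List.filter_cons, h1, List.append_assoc]
      · have hins : PySem.List.insertBy (fun a b => decide (a.1 < b.1)) x (A ++ B ++ C ++ D)
            = A ++ B ++ (C ++ [x]) ++ D := by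
          rw [List.append_assoc, List.append_assoc,
              pv_insertBy_skip _ _ A _ (fun y hy => by simp [hA y hy, h2]),
              pv_insertBy_skip _ _ B _ (fun y hy => by simp [hB y hy, h2]),
              pv_insertBy_skip _ _ C _ (fun y hy => by simp [hC y hy, h2]),
              pv_insertBy_front _ _ _ (fun y hy => by simp [h2, hD y hy])]
          simp [List.append_assoc]
        rw [hins, ih A B (C ++ [x]) D (fun t ht => hx t (by simp [ht])) hA hB
            (fun t ht => by
              rcases List.mem_append.1 ht with ht | ht
              · exact hC t ht
              · simp at ht; subst ht; exact h2) hD]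
        simp [List.filter_cons, h2, List.append_assoc]
      · have hins : PySem.List.insertBy (fun a b => decide (a.1 < b.1)) x (A ++ B ++ C ++ D)
            = A ++ B ++ C ++ (D ++ [x]) := by
          rw [PySem.List.insertBy_of_forall_not_before _ _ _ (fun y hy => by
            rcases List.mem_append.1 hy with hy | hy
            · rcases List.mem_append.1 hy with hy | hy
              · rcases List.mem_append.1 hy with hy | hy
                · simp [h3, hA y hy]
                · simp [h3, hB y hy]
              · simp [h3, hC y hy]
            · simp [h3, hD y hy])]
          simp [List.append_assoc]
        rw [hins, ih A B C (D ++ [x]) (fun t ht => hx t (by simp [ht])) hA hB hC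
            (fun t ht => by
              rcases List.mem_append.1 ht with ht | ht
              · exact hD t ht
              · simp at ht; subst ht; exact h3)]
        simp [List.filter_cons, h3, List.append_assoc]

lemma pv_sorted_scored (q : List Char) (L : List (String × String)) :
    PySem.List.sorted (pvScored q L) (fun t => t.1)
      = (pvF q 0 L).map (fun cd => ((0 : Int), cd.1, cd.2))
        ++ (pvF q 1 L).map (fun cd => ((1 : Int), cd.1, cd.2))
        ++ (pvF q 2 L).map (fun cd => ((2 : Int), cd.1, cd.2))
        ++ (pvF q 3 L).map (fun cd => ((3 : Int), cd.1, cd.2)) := by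
  rw [PySem.List.sorted_eq_foldl_insertBy]
  have h := pv_sort4 (pvScored q L) [] [] [] [] (pv_scored_mem q L)
    (by simp) (by simp) (by simp) (by simp)
  simp only [List.nil_append] at h
  rw [h, pv_filter_scored q 0 L, pv_filter_scored q 1 L, pv_filter_scored q 2 L,
      pv_filter_scored q 3 L]

-- A's categorization fold, fully characterized
lemma pv_foldA_spec (q : List Char) : ∀ (L : List (String × String))
    (e s c d : PySem.Dict String String),
    (L.map Prod.fst).Nodup →
    (∀ cd ∈ L, e.contains cd.1 = false ∧ s.contains cd.1 = false ∧ c.contains cd.1 = false ∧ d.contains cd.1 = false) →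
    L.foldl (pvStepA q) (e, s, c, d) =
      (PySem.Dict.mk (e.items ++ pvF q 0 L), PySem.Dict.mk (s.items ++ pvF q 1 L),
       PySem.Dict.mk (c.items ++ pvF q 2 L), PySem.Dict.mk (d.items ++ pvF q 3 L)) := by
  intro L
  induction L with
  | nil =>
      intro e s c d _ _
      cases e; cases s; cases c; cases d
      simp [pvF]
  | cons cd L ih =>
      intro e s c d hnd hfresh
      obtain ⟨he, hs, hc, hd⟩ := hfresh cd (by simp)
      have hmem : cd.1 ∉ L.map Prod.fst ∧ (L.map Prod.fst).Nodup := by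
        simpa [List.nodup_cons] using hnd
      have hne : ∀ cd' ∈ L, (cd'.1 == cd.1) = false := by
        intro cd' h'
        have hne' : cd'.1 ≠ cd.1 := by
          intro hEq
          exact hmem.1 (hEq ▸ List.mem_map_of_mem h')
        simpa using hne'
      have hcontains : ∀ (x : PySem.Dict String String) (v : String),
          ∀ cd' ∈ L, x.contains cd'.1 = false → (x.insert cd.1 v).contains cd'.1 = false := by
        intro x v cd' h' hx
        rw [PySem.Dict.contains_insert]
        simp [hne cd' h', hx]
      simp only [List.foldl_cons, pvStepA]
      split_ifs with g0 g1 g2 g3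
      · rw [ih (e.insert cd.1 cd.2) s c d hmem.2
          (fun cd' h' => ⟨hcontains e cd.2 cd' h' (hfresh cd' (by simp [h'])).1,
            (hfresh cd' (by simp [h'])).2.1, (hfresh cd' (by simp [h'])).2.2.1,
            (hfresh cd' (by simp [h'])).2.2.2⟩)]
        have hp0 : PySem.Chars.lower cd.1.toList = q := by simpa using g0
        simp [pvF, List.filter_cons, pvPrio, hp0,
          PySem.Dict.items_insert_of_not_contains e cd.2 he, List.append_assoc]
      · rw [ih e (s.insert cd.1 cd.2) c d hmem.2
          (fun cd' h' => ⟨(hfresh cd' (by simp [h'])).1,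
            hcontains s cd.2 cd' h' (hfresh cd' (by simp [h'])).2.1,
            (hfresh cd' (by simp [h'])).2.2.1, (hfresh cd' (by simp [h'])).2.2.2⟩)]
        have hn0 : ¬(PySem.Chars.lower cd.1.toList = q) := by simpa using g0
        simp [pvF, List.filter_cons, pvPrio, hn0, g1,
          PySem.Dict.items_insert_of_not_contains s cd.2 hs, List.append_assoc]
      · rw [ih e s (c.insert cd.1 cd.2) d hmem.2
          (fun cd' h' => ⟨(hfresh cd' (by simp [h'])).1, (hfresh cd' (by simp [h'])).2.1,
            hcontains c cd.2 cd' h' (hfresh cd' (by simp [h'])).2.2.1,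
            (hfresh cd' (by simp [h'])).2.2.2⟩)]
        have hn0 : ¬(PySem.Chars.lower cd.1.toList = q) := by simpa using g0
        simp [pvF, List.filter_cons, pvPrio, hn0, g1, g2,
          PySem.Dict.items_insert_of_not_contains c cd.2 hc, List.append_assoc]
      · rw [ih e s c (d.insert cd.1 cd.2) hmem.2
          (fun cd' h' => ⟨(hfresh cd' (by simp [h'])).1, (hfresh cd' (by simp [h'])).2.1,
            (hfresh cd' (by simp [h'])).2.2.1,
            hcontains d cd.2 cd' h' (hfresh cd' (by simp [h'])).2.2.2⟩)]
        have hn0 : ¬(PySem.Chars.lower cd.1.toList = q) := by simpa using g0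
        simp [pvF, List.filter_cons, pvPrio, hn0, g1, g2, g3,
          PySem.Dict.items_insert_of_not_contains d cd.2 hd, List.append_assoc]
      · rw [ih e s c d hmem.2 (fun cd' h' => hfresh cd' (by simp [h']))]
        have hn0 : ¬(PySem.Chars.lower cd.1.toList = q) := by simpa using g0
        simp [pvF, List.filter_cons, pvPrio, hn0, g1, g2, g3]

lemma pv_update_items (d : PySem.Dict String String) (ps : List (String × String))
    (h1 : ∀ p ∈ ps, d.contains p.1 = false) (h2 : (ps.map Prod.fst).Nodup) :
    (d.update ps).items = d.items ++ ps := by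
  show (List.foldl (fun d p => d.insert p.1 p.2) d ps).items = d.items ++ ps
  simpa using PySem.Dict.items_foldl_insert_fresh ps Prod.fst Prod.snd d h1 h2

lemma pv_keys_disj (q : List Char) {L : List (String × String)} (hL : (L.map Prod.fst).Nodup)
    {j k : Int} (hjk : j ≠ k) :
    ∀ x ∈ (pvF q j L).map Prod.fst, x ∉ (pvF q k L).map Prod.fst := by
  intro x hx hx'
  simp only [pvF, List.mem_map, List.mem_filter] at hx hx'
  obtain ⟨cd, ⟨hcdL, hj⟩, rfl⟩ := hx
  obtain ⟨cd', ⟨hcdL', hk⟩, hEq⟩ := hx'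
  have hcc : cd' = cd := List.inj_on_of_nodup_map hL hcdL' hcdL hEq
  subst hcc
  simp only [beq_iff_eq] at hj hk
  rw [hj] at hk
  injection hk with hk
  exact hjk hk

lemma pv_keys_sub (q : List Char) (k : Int) (L : List (String × String)) :
    ((pvF q k L).map Prod.fst).Sublist (L.map Prod.fst) := by
  exact List.Sublist.map Prod.fst List.filter_sublist

lemma pv_items_mk (l : List (String × String)) : (PySem.Dict.mk l).items = l := rfl

lemma pv_items_empty : (PySem.Dict.empty : PySem.Dict String String).items = [] := rfl

lemma pv_contains_of_items {d : PySem.Dict String String} {l : List (String × String)}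
    (h : d.items = l) (x : String) (hx : x ∉ l.map Prod.fst) : d.contains x = false := by
  rw [PySem.Dict.contains_eq_decide_mem_keys]
  have hk : d.keys = l.map Prod.fst := by
    rw [show d.keys = d.items.map Prod.fst from rfl, h]
  simp [hk, hx]

lemma pv_slice_map {α β : Type} (f : α → β) (xs : List α) (b : Int) :
    (PySem.List.slice xs none (some b)).map f = PySem.List.slice (xs.map f) none (some b) := by
  by_cases hb : 0 ≤ b
  · rw [PySem.List.slice_to xs hb, PySem.List.slice_to (xs.map f) hb, List.map_take]
  · push_neg at hb
    have hk : 0 < (-b).toNat := by omega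
    have hb' : b = -(((-b).toNat : Nat) : Int) := by
      have := Int.toNat_of_nonneg (by omega : (0:Int) ≤ -b)
      omega
    rw [hb', PySem.List.slice_to_neg_natCast xs _ hk,
        PySem.List.slice_to_neg_natCast (xs.map f) _ hk, List.map_take, List.length_map]

theorem pv_main (icd_codes_dict : List (String × String)) (query : String) (limit : Int) :
    search_icd icd_codes_dict query limit = search_icd_alt icd_codes_dict query limit := by
  have hLnd : (((PySem.Dict.ofList icd_codes_dict).items).map Prod.fst).Nodup :=
    PySem.Dict.nodup_keys_ofList icd_codes_dict
  simp only [search_icd, search_icd_alt]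
  rw [pv_guard_eq query]
  by_cases hq : (PySem.Chars.lower (PySem.Chars.strip query.toList) == ([] : List Char)) = true
  · simp [hq]
  · rw [Bool.not_eq_true] at hq
    simp only [hq, Bool.false_eq_true, if_false]
    set q := PySem.Chars.lower (PySem.Chars.strip query.toList) with hqd
    set L := (PySem.Dict.ofList icd_codes_dict).items with hLd
    -- A's categorization fold
    rw [pv_foldA_spec q L PySem.Dict.empty PySem.Dict.empty PySem.Dict.empty PySem.Dict.empty
      hLnd (fun cd _ => ⟨PySem.Dict.contains_empty _, PySem.Dict.contains_empty _,
        PySem.Dict.contains_empty _, PySem.Dict.contains_empty _⟩)]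
    simp only [pv_items_mk, pv_items_empty, List.nil_append]
    -- B's scoring fold and stable sort
    rw [pv_foldB_eq q L []]
    simp only [List.nil_append]
    rw [pv_sorted_scored q L]
    set F0 := pvF q 0 L with hF0
    set F1 := pvF q 1 L with hF1
    set F2 := pvF q 2 L with hF2
    set F3 := pvF q 3 L with hF3
    have nd0 : (F0.map Prod.fst).Nodup := hLnd.sublist (pv_keys_sub q 0 L)
    have nd1 : (F1.map Prod.fst).Nodup := hLnd.sublist (pv_keys_sub q 1 L)
    have nd2 : (F2.map Prod.fst).Nodup := hLnd.sublist (pv_keys_sub q 2 L)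
    have nd3 : (F3.map Prod.fst).Nodup := hLnd.sublist (pv_keys_sub q 3 L)
    -- the combined result list
    have hc0 : ((PySem.Dict.empty : PySem.Dict String String).update F0).items = F0 := by
      rw [pv_update_items _ _ (fun p _ => PySem.Dict.contains_empty _) nd0, pv_items_empty,
        List.nil_append]
    have hc1 : (((PySem.Dict.empty : PySem.Dict String String).update F0).update F1).items
        = F0 ++ F1 := by
      rw [pv_update_items _ _ (fun p hp => pv_contains_of_items hc0 p.1
        (pv_keys_disj q hLnd (by decide : (1:Int) ≠ 0) p.1 (List.mem_map_of_mem hp))) nd1, hc0]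
    have hc2 : ((((PySem.Dict.empty : PySem.Dict String String).update F0).update F1).update
        F2).items = F0 ++ F1 ++ F2 := by
      rw [pv_update_items _ _ (fun p hp => pv_contains_of_items hc1 p.1 (by
        have h20 := pv_keys_disj q hLnd (by decide : (2:Int) ≠ 0) p.1 (List.mem_map_of_mem hp)
        have h21 := pv_keys_disj q hLnd (by decide : (2:Int) ≠ 1) p.1 (List.mem_map_of_mem hp)
        simp only [List.map_append, List.mem_append]
        exact fun h => h.elim h20 h21)) nd2, hc1]
    have hc3 : (((((PySem.Dict.empty : PySem.Dict String String).update F0).update F1).update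
        F2).update F3).items = F0 ++ F1 ++ F2 ++ F3 := by
      rw [pv_update_items _ _ (fun p hp => pv_contains_of_items hc2 p.1 (by
        have h30 := pv_keys_disj q hLnd (by decide : (3:Int) ≠ 0) p.1 (List.mem_map_of_mem hp)
        have h31 := pv_keys_disj q hLnd (by decide : (3:Int) ≠ 1) p.1 (List.mem_map_of_mem hp)
        have h32 := pv_keys_disj q hLnd (by decide : (3:Int) ≠ 2) p.1 (List.mem_map_of_mem hp)
        simp only [List.map_append, List.mem_append]
        exact fun h => h.elim (fun h' => h'.elim h30 h31) h32)) nd3, hc2]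
    set R := F0 ++ F1 ++ F2 ++ F3 with hR
    have hdisj : ∀ (j k : Int), j ≠ k → ∀ x ∈ (pvF q j L).map Prod.fst,
        ∀ b ∈ (pvF q k L).map Prod.fst, x ≠ b :=
      fun j k hjk x hx b hb hxb => pv_keys_disj q hLnd hjk x hx (hxb ▸ hb)
    have ndR : (R.map Prod.fst).Nodup := by
      rw [hR]
      simp only [List.map_append]
      rw [List.nodup_append, List.nodup_append, List.nodup_append]
      refine ⟨⟨⟨nd0, nd1, hdisj 0 1 (by decide)⟩, nd2, ?_⟩, nd3, ?_⟩
      · intro x hx b hb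
        rcases List.mem_append.1 hx with hx | hx
        · exact hdisj 0 2 (by decide) x hx b hb
        · exact hdisj 1 2 (by decide) x hx b hb
      · intro x hx b hb
        rcases List.mem_append.1 hx with hx | hx
        · rcases List.mem_append.1 hx with hx | hx
          · exact hdisj 0 3 (by decide) x hx b hb
          · exact hdisj 1 3 (by decide) x hx b hb
        · exact hdisj 2 3 (by decide) x hx b hb
    -- B's sorted list maps onto R
    have hmapg : (F0.map (fun cd => ((0 : Int), cd.1, cd.2))
        ++ F1.map (fun cd => ((1 : Int), cd.1, cd.2))
        ++ F2.map (fun cd => ((2 : Int), cd.1, cd.2))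
        ++ F3.map (fun cd => ((3 : Int), cd.1, cd.2))).map
          (fun t : Int × String × String => (t.2.1, t.2.2)) = R := by
      rw [hR]
      simp [List.map_append, List.map_map, Function.comp_def]
    have hlen : (F0.map (fun cd => ((0 : Int), cd.1, cd.2))
        ++ F1.map (fun cd => ((1 : Int), cd.1, cd.2))
        ++ F2.map (fun cd => ((2 : Int), cd.1, cd.2))
        ++ F3.map (fun cd => ((3 : Int), cd.1, cd.2))).length = R.length := by
      have := congrArg List.length hmapg
      simpa using this
    have hsz : (((((PySem.Dict.empty : PySem.Dict String String).update F0).update F1).update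
        F2).update F3).size = R.length := by
      rw [show ∀ d : PySem.Dict String String, d.size = d.items.length from fun _ => rfl, hc3]
    rw [hsz, hc3, hlen]
    split_ifs with hlim
    · rw [pv_slice_map, hmapg]
    · rw [hmapg]
      rw [show (PySem.Dict.ofList R) = (PySem.Dict.empty : PySem.Dict String String).update R
        from rfl]
      rw [pv_update_items _ _ (fun p _ => PySem.Dict.contains_empty _) ndR, pv_items_empty,
        List.nil_append]
      exact hc3

-- ===== VERDICT (by name: the statement is the Claim_ definition above) =====
theorem search_icd_spec : Claim_equal_search_icd := by
  intro icd_codes_dict query limit _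
  exact pv_main icd_codes_dict query limit
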